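-- pv_equiv track=rewrite | github.com/zera-bot/plusminus-mini | mathcode/parser.py | miniTokenizeMain
-- ===== SOURCE A (Python) =====
-- def ssB(string,a,b):
--     # get a substring between characters a and b of a string
--     # a inclusive, b exclusive
--     return string[a:b]
--
-- def splitStringByNonNestedCommas(s):
--     # go through string, if comma is inside brackets, ignore
--     # otherwise split with commas
--     l = []
--     currentLiteral = ""
--
--     bracketList = []
--     for c in [*s]:
--         if c == "<": bracketList.append("<")
--         elif c == ">": bracketList.append(">")
--
--         if "<" in bracketList and ">" in bracketList:
--             bracketList.remove("<")
--             bracketList.remove(">")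
--
--         if len(bracketList) == 0 and c == ",":
--             l.append(currentLiteral)
--             currentLiteral = ""
--         else:
--             currentLiteral+=c
--
--     if currentLiteral != "": l.append(currentLiteral)
--     return l
--
-- def miniTokenizeMain(s):
--     miniMain = []
--
--     currentLiteral = ""
--     indexToSkipTo = -1
--     for ind,c in enumerate([*s]):
--         if ind < indexToSkipTo: continue
--
--         if c == "[":
--             #add current literal to list
--             if currentLiteral != "":
--                 miniMain.append(["OTHER",currentLiteral])
--             currentLiteral = ""
--
--             #start parsing delimiter
--             startingInd=ind
--             pseudoInd = ind
--             while s[pseudoInd] != "]": pseudoInd+=1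
--
--             delimName = ssB(s,startingInd+1,pseudoInd)
--
--             # find end of delimiter (after all of the delimiter's entries)
--             # after we parse this delimiter we will tell the computer to not read
--             # until after the already parsed delimiter
--
--             # get start and end of triangle brackets of delimiter (and form substring)
--             bracketList = ["<"]
--             inputsStartingInd = pseudoInd+1
--             inputsEndingInd = pseudoInd+1
--             while len(bracketList) != 0:
--                 inputsEndingInd+=1
--                 if s[inputsEndingInd] == "<": bracketList.append("<")
--                 elif s[inputsEndingInd] == ">": bracketList.append(">")
--
--                 if "<" in bracketList and ">" in bracketList:
--                     bracketList.remove("<")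
--                     bracketList.remove(">")
--
--             #delimiterInputsString is the stuff inside the triangle brackets
--             delmiterInputsString = ssB(s,inputsStartingInd+1,inputsEndingInd)
--
--             miniMain.append(["DELIM",delimName,*splitStringByNonNestedCommas(delmiterInputsString)])
--             indexToSkipTo=inputsEndingInd+1
--         else:
--             currentLiteral+=c
--
--         if currentLiteral != "":
--             miniMain.append(["OTHER",currentLiteral])
--         currentLiteral = ""
--
--     return miniMain
-- ===== SOURCE B (Python) =====
-- # Staged re-implementation: one precomputed prefix-depth array + library find/index
-- # locate the pieces; tokens are assembled from slices at computed cut positions,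
-- # with no running bracket state or character accumulator in the main scan.
--
-- def miniTokenizeMain(s):
--     n = len(s)
--     # pref[t] = (# of '>') - (# of '<') in s[:t], built once
--     pref = [0] * (n + 1)
--     for t, c in enumerate(s):
--         pref[t + 1] = pref[t] + (c == '>') - (c == '<')
--     out = []
--     i = 0
--     while True:
--         nb = s.find('[', i)
--         if nb == -1:
--             out.extend(["OTHER", c] for c in s[i:])
--             return out
--         out.extend(["OTHER", c] for c in s[i:nb])
--         j = s.index(']', nb + 1)          # ValueError if the name is unterminated
--         lo = j + 2                        # s[j+1] is the implicit opener, skipped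
--         # closing position: first t with net '>' surplus 1 relative to lo
--         k = next(t for t in range(lo, n) if pref[t + 1] - pref[lo] == 1)
--         # top-level commas of the inputs region = commas at unchanged prefix depth
--         cuts = [t for t in range(lo, k) if s[t] == ',' and pref[t] == pref[lo]]
--         parts, prev = [], lo
--         for t in cuts:
--             parts.append(s[prev:t])
--             prev = t + 1
--         parts.append(s[prev:k])
--         if parts[-1] == "":
--             parts.pop()
--         out.append(["DELIM", s[nb + 1:j], *parts])
--         i = k + 1
-- ===== Notes on version B (the rewrite author's own statement) =====
-- stated objective: alternative
-- what changed: Replaced A's single stateful scan (enumerate loop with continue-skips, a bracket-symbol list for nesting and a character accumulator, plus a char-by-char comma splitter) by a staged design: a global prefix-depth array built once, library find/index to locate '[' and ']', the closing bracket and the top-level commas found as positions where the prefix array takes required values, and all tokens assembled from string slices between those computed positions.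
import Mathlib
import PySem

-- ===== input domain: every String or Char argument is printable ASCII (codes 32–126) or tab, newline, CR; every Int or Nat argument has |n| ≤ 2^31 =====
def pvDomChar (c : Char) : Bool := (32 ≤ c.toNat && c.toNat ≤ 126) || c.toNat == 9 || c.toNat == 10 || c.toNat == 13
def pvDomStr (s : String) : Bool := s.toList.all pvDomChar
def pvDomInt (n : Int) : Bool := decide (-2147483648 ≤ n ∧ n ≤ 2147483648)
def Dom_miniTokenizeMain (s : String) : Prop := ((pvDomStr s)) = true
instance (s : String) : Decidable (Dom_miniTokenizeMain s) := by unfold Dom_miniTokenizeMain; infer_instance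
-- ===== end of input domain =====

-- B replaces A's single stateful scan (continue-skips, bracket-symbol list, char
-- accumulator, char-by-char comma splitter) by a staged design: a prefix-depth
-- array built once, find/index for '[' and ']', and tokens assembled from slices
-- at positions computed from the array.

-- ===== PORT A =====

-- list.remove under a membership guard (Python raises ValueError only when absent;
-- every call site in A is guarded by the membership test, so getD is never reached)
def pyRemove (l : List Char) (c : Char) : List Char := (PySem.List.remove? l c).getD l

-- A's repeated 4-line bracketList update block (it appears verbatim twice in the Python), ported once
def blStep (bl : List Char) (c : Char) : List Char :=
  let bl1 := if c = '<' then bl ++ ['<'] else if c = '>' then bl ++ ['>'] else bl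
  if '<' ∈ bl1 ∧ '>' ∈ bl1 then pyRemove (pyRemove bl1 '<') '>' else bl1

-- helper ssB: s[a:b]
def ssB (string : String) (a b : Int) : String := PySem.Str.slice string (some a) (some b)

-- splitStringByNonNestedCommas: fold over the characters with (l, currentLiteral, bracketList)
def splitCoreA (cs : List Char) (l : List String) (cur : List Char) (bl : List Char) : List String :=
  match cs with
  | [] => if cur ≠ [] then l ++ [String.ofList cur] else l
  | c :: rest =>
    let bl2 := blStep bl c
    if bl2.length = 0 ∧ c = ',' then splitCoreA rest (l ++ [String.ofList cur]) [] bl2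
    else splitCoreA rest l (cur ++ [c]) bl2

def splitStringByNonNestedCommas (s : String) : List String := splitCoreA s.toList [] [] []

-- `while s[pseudoInd] != "]": pseudoInd += 1`  (none = IndexError: ran off the end)
def findRBr (cs : List Char) (p : Nat) : Option Nat :=
  if h : p < cs.length then
    if cs[p] = ']' then some p else findRBr cs (p + 1)
  else none
  termination_by cs.length - p

-- the `while len(bracketList) != 0` scan; e is inputsEndingInd, bl is bracketList;
-- returns the final inputsEndingInd (none = IndexError on s[inputsEndingInd])
def scanAux (cs : List Char) (e : Nat) (bl : List Char) : Option Nat :=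
  if bl = [] then some e
  else if h : e + 1 < cs.length then
    scanAux cs (e + 1) (blStep bl cs[e + 1])
  else none
  termination_by cs.length - e

-- the main `for ind, c in enumerate([*s])`, ported as index recursion over the same state
-- (an iteration with ind < indexToSkipTo recurses unchanged = `continue`); none = IndexError inside
def loopA (cs : List Char) (i : Nat) (mm : List (List String)) (cur : List Char) (skip : Int) :
    Option (List (List String)) :=
  if h : i < cs.length then
    if (i : Int) < skip then loopA cs (i + 1) mm cur skip
    else if cs[i] = '[' then
      let mm1 := if cur ≠ [] then mm ++ [["OTHER", String.ofList cur]] else mm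
      match findRBr cs i with
      | none => none
      | some j =>
        match scanAux cs (j + 1) ['<'] with
        | none => none
        | some e =>
          let delimName := ssB (String.ofList cs) ((i : Int) + 1) (j : Int)
          let inputs := ssB (String.ofList cs) ((j : Int) + 1 + 1) (e : Int)
          let mm2 := mm1 ++ [["DELIM", delimName] ++ splitStringByNonNestedCommas inputs]
          -- bottom of the loop body: currentLiteral is "" here, so no OTHER token is emitted
          loopA cs (i + 1) mm2 [] ((e : Int) + 1)
    else
      -- bottom of the loop body: currentLiteral = cur ++ [c] ≠ "", emit it and clear
      loopA cs (i + 1) (mm ++ [["OTHER", String.ofList (cur ++ [cs[i]])]]) [] skip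
  else some mm
  termination_by cs.length - i

def miniTokenizeMain (s : String) : List (List String) :=
  (loopA s.toList 0 [] [] (-1)).getD []

-- ===== PORT B =====

-- pref[t+1] = pref[t] + (c == '>') - (c == '<')
def dval (c : Char) : Int := (if c = '>' then 1 else 0) - (if c = '<' then 1 else 0)

-- the pref-building loop: buildPref cs p = [p, p + dval c0, …]
def buildPref (cs : List Char) (p : Int) : List Int :=
  match cs with
  | [] => [p]
  | c :: r => p :: buildPref r (p + dval c)

-- s.find(ch, i) for a one-character needle: first index ≥ i holding ch (none = -1); exact
def findCh (cs : List Char) (c : Char) (i : Nat) : Option Nat :=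
  if h : i < cs.length then
    if cs[i] = c then some i else findCh cs c (i + 1)
  else none
  termination_by cs.length - i

-- the `next(t for t in range(lo, n) if pref[t+1] - pref[lo] == 1)` search (none = StopIteration)
def findKAux (cs : List Char) (pr : List Int) (lo t : Nat) : Option Nat :=
  if h : t < cs.length then
    if pr.getD (t + 1) 0 - pr.getD lo 0 = 1 then some t else findKAux cs pr lo (t + 1)
  else none
  termination_by cs.length - t

-- `cuts = [t for t in range(lo, k) if s[t] == ',' and pref[t] == pref[lo]]`
def cutsOf (cs : List Char) (pr : List Int) (lo k : Nat) : List Nat :=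
  (List.range' lo (k - lo)).filter
    (fun t => decide (cs.getD t ' ' = ',' ∧ pr.getD t 0 = pr.getD lo 0))

-- the `for t in cuts` slicing loop; returns (parts, prev)
def partsFold (cs : List Char) (cuts : List Nat) (prev : Nat) (parts : List String) :
    List String × Nat :=
  match cuts with
  | [] => (parts, prev)
  | t :: rest =>
    partsFold cs rest (t + 1)
      (parts ++ [PySem.Str.slice (String.ofList cs) (some (prev : Int)) (some (t : Int))])

-- bounds lemmas cited by loopB's decreasing_by
theorem findCh_bounds (cs : List Char) (c : Char) (i : Nat) :
    ∀ j, findCh cs c i = some j → i ≤ j ∧ j < cs.length := by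
  fun_induction findCh cs c i with
  | case1 i hi heq => intro j h; simp at h; omega
  | case2 i hi hne ih => intro j h; have := ih j h; omega
  | case3 => intro j h; simp at h

theorem findKAux_bounds (cs : List Char) (pr : List Int) (lo t : Nat) :
    ∀ k, findKAux cs pr lo t = some k → t ≤ k ∧ k < cs.length := by
  fun_induction findKAux cs pr lo t with
  | case1 t ht heq => intro k h; simp at h; omega
  | case2 t ht hne ih => intro k h; have := ih k h; omega
  | case3 => intro k h; simp at h

-- the parts-construction block: slices between the cut positions, last dropped if empty
def partsOf (cs : List Char) (pr : List Int) (lo k : Nat) : List String :=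
  let pp := partsFold cs (cutsOf cs pr lo k) lo []
  let ps := pp.1 ++ [PySem.Str.slice (String.ofList cs) (some (pp.2 : Int)) (some (k : Int))]
  if (ps.getLast?.getD "") = "" then ps.dropLast else ps

-- the `while True` loop: each round handles one stretch of ordinary chars and one delimiter group
def loopB (cs : List Char) (pr : List Int) (i : Nat) : Option (List (List String)) :=
  match hnb : findCh cs '[' i with
  | none => some ((PySem.List.slice cs (some (i : Int)) none).map (fun c => ["OTHER", String.ofList [c]]))
  | some nb =>
    match hj : findCh cs ']' (nb + 1) with
    | none => none                       -- s.index raises ValueError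
    | some j =>
      match hk : findKAux cs pr (j + 2) (j + 2) with
      | none => none                     -- next(…) raises StopIteration
      | some k =>
        match loopB cs pr (k + 1) with
        | none => none
        | some r =>
          some (((PySem.List.slice cs (some (i : Int)) (some (nb : Int))).map
              (fun c => ["OTHER", String.ofList [c]]))
            ++ (["DELIM", PySem.Str.slice (String.ofList cs) (some ((nb : Int) + 1)) (some (j : Int))]
                ++ partsOf cs pr (j + 2) k) :: r)
  termination_by cs.length - i
  decreasing_by
    have h1 := findCh_bounds cs '[' i nb hnb
    have h2 := findCh_bounds cs ']' (nb + 1) j hj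
    have h3 := findKAux_bounds cs pr (j + 2) (j + 2) k hk
    omega

def miniTokenizeMain_alt (s : String) : List (List String) :=
  (loopB s.toList (buildPref s.toList 0) 0).getD []

-- ===== PRECONDITION & SPEC =====

-- Pre_: the string is a sequence of ordinary characters and complete delimiter groups
-- '[' name ']' x ⟨body balanced in '<'/'>' and closing with '>'⟩, where name contains no ']'
-- and x is the single char A consumes unchecked as the implicit opener.
-- Exactly on these strings the Python A returns; elsewhere it raises IndexError (and B raises too).
-- Stated as a one-symbol-at-a-time finite-state grammar check (mode: outside a group /
-- inside the name / the skipped opener char / inside the body at nesting depth d).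
inductive WfMode : Type
  | norm : WfMode
  | name : WfMode
  | skip : WfMode
  | body : Nat → WfMode
deriving DecidableEq, Repr

def wfA (l : List Char) (m : WfMode) : Bool :=
  match l with
  | [] => m = WfMode.norm         -- a group must not be left open at the end
  | c :: rest =>
    match m with
    | WfMode.norm => wfA rest (if c = '[' then WfMode.name else WfMode.norm)
    | WfMode.name => wfA rest (if c = ']' then WfMode.skip else WfMode.name)
    | WfMode.skip => wfA rest (WfMode.body 1)
    | WfMode.body d =>
      wfA rest (if c = '<' then WfMode.body (d + 1)
        else if c = '>' then (if d = 1 then WfMode.norm else WfMode.body (d - 1))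
        else WfMode.body d)

def Pre_miniTokenizeMain (s : String) : Prop := wfA s.toList WfMode.norm = true
instance (s : String) : Decidable (Pre_miniTokenizeMain s) := by
  unfold Pre_miniTokenizeMain; infer_instance

def pvWitness_miniTokenizeMain : String := "a[f]<x,y<1,2>>b"

def Spec_miniTokenizeMain (s : String) (out : List (List String)) : Prop := out = miniTokenizeMain_alt s
instance (s : String) (out : List (List String)) : Decidable (Spec_miniTokenizeMain s out) := by
  unfold Spec_miniTokenizeMain; infer_instance

-- ===== CLAIM (what is proved, stated in full; the proofs are below) =====
def Claim_equal_miniTokenizeMain : Prop :=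
  ∀ (s : String), Dom_miniTokenizeMain s → Pre_miniTokenizeMain s →
    Spec_miniTokenizeMain s (miniTokenizeMain s)

-- ===== LEMMAS AND PROOFS =====

-- the depth step of A's splitter, written as an integer counter
def upd (d : Int) (c : Char) : Int := if c = '<' then d + 1 else if c = '>' then d - 1 else d

theorem upd_eq_sub_dval (d : Int) (c : Char) : upd d c = d - dval c := by
  unfold upd dval
  by_cases h1 : c = '<' <;> by_cases h2 : c = '>' <;> simp_all

-- prefix sums of dval: psum cs t = pref[t]
def psum (cs : List Char) (t : Nat) : Int := ((cs.take t).map dval).sum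

theorem psum_succ (cs : List Char) (t : Nat) (h : t < cs.length) :
    psum cs (t + 1) = psum cs t + dval cs[t] := by
  unfold psum
  rw [List.take_add_one, List.getElem?_eq_getElem h]
  rw [List.map_append, List.sum_append]
  simp

theorem buildPref_getD (cs : List Char) (p : Int) (t : Nat) (h : t ≤ cs.length) :
    (buildPref cs p).getD t 0 = p + psum cs t := by
  induction cs generalizing p t with
  | nil =>
    have ht : t = 0 := by simpa using h
    subst ht
    simp [buildPref, psum]
  | cons c r ih =>
    cases t with
    | zero => simp [buildPref, psum]
    | succ t =>
      have := ih (p + dval c) t (by simpa using h)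
      simp only [buildPref, List.getD_cons_succ, this, psum, List.take_succ_cons,
        List.map_cons, List.sum_cons]
      ring

-- depth-counter splitter (intermediate between A's bracket-list splitter and B's cut positions)
def splitTopCore (cs : List Char) (parts : List String) (buf : List Char) (d : Int) : List String :=
  match cs with
  | [] => if buf = [] then parts else parts ++ [String.ofList buf]
  | c :: rest =>
    if upd d c = 0 ∧ c = ',' then splitTopCore rest (parts ++ [String.ofList buf]) [] (upd d c)
    else splitTopCore rest parts (buf ++ [c]) (upd d c)

-- A's bracketList is always sign-uniform: it is `pad` of the signed depth.
def pad (d : Int) : List Char :=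
  if 0 ≤ d then List.replicate d.toNat '<' else List.replicate (-d).toNat '>'

theorem pad_eq_nil_iff (d : Int) : pad d = [] ↔ d = 0 := by
  unfold pad; split_ifs with h <;> simp <;> omega

theorem remove?_append_singleton_of_not_mem {x : Char} {l : List Char} (h : x ∉ l) :
    PySem.List.remove? (l ++ [x]) x = some l := by
  induction l with
  | nil => simp [PySem.List.remove?_cons_self]
  | cons a t ih =>
    have hax : a ≠ x := by rintro rfl; simp at h
    rw [List.cons_append, PySem.List.remove?_cons_of_ne _ hax, ih (by simp_all)]
    rfl

theorem notmem_replicate {a b : Char} (h : a ≠ b) (n : Nat) : a ∉ List.replicate n b := by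
  rw [List.mem_replicate]; rintro ⟨_, rfl⟩; exact h rfl

theorem pyRemove_append (x : Char) (l : List Char) (h : x ∉ l) : pyRemove (l ++ [x]) x = l := by
  unfold pyRemove; rw [remove?_append_singleton_of_not_mem h]; rfl

theorem pyRemove_cons (x : Char) (l : List Char) : pyRemove (x :: l) x = l := by
  unfold pyRemove; rw [PySem.List.remove?_cons_self]; rfl

-- one bracketList step of A equals one counter step, through pad
theorem pad_step (d : Int) (c : Char) : blStep (pad d) c = pad (upd d c) := by
  by_cases h1 : c = '<'
  · subst h1
    simp only [blStep, upd, reduceIte]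
    by_cases hd : 0 ≤ d
    · rw [show pad d = List.replicate d.toNat '<' from if_pos hd,
          show pad (d + 1) = List.replicate (d + 1).toNat '<' from if_pos (by omega)]
      rw [← List.replicate_succ']
      rw [if_neg (by simp [List.mem_replicate])]
      rw [show (d + 1).toNat = d.toNat + 1 by omega]
    · have hn : (-d).toNat = ((-d).toNat - 1) + 1 := by omega
      rw [show pad d = List.replicate (-d).toNat '>' from if_neg hd]
      rw [if_pos (by constructor <;> simp [List.mem_replicate] <;> omega)]
      rw [pyRemove_append '<' _ (notmem_replicate (by decide) _)]
      rw [hn, List.replicate_succ, pyRemove_cons]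
      by_cases hd1 : 0 ≤ d + 1
      · rw [show pad (d + 1) = List.replicate (d + 1).toNat '<' from if_pos hd1]
        rw [show (-d).toNat - 1 = 0 by omega, show (d + 1).toNat = 0 by omega]
        simp
      · rw [show pad (d + 1) = List.replicate (-(d + 1)).toNat '>' from if_neg hd1]
        rw [show (-(d + 1)).toNat = (-d).toNat - 1 by omega]
  · by_cases h2 : c = '>'
    · subst h2
      simp only [blStep, upd, h1, reduceIte]
      by_cases hd : 0 ≤ d
      · by_cases hd0 : d = 0
        · subst hd0
          decide
        · have hn : d.toNat = (d.toNat - 1) + 1 := by omega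
          rw [show pad d = List.replicate d.toNat '<' from if_pos hd]
          rw [if_pos (by constructor <;> simp [List.mem_replicate] <;> omega)]
          rw [hn, List.replicate_succ, List.cons_append]
          rw [pyRemove_cons]
          rw [pyRemove_append '>' _ (notmem_replicate (by decide) _)]
          rw [show pad (d - 1) = List.replicate (d - 1).toNat '<' from if_pos (by omega)]
          rw [show (d - 1).toNat = d.toNat - 1 by omega]
      · rw [show pad d = List.replicate (-d).toNat '>' from if_neg hd]
        rw [← List.replicate_succ']
        rw [if_neg (by simp [List.mem_replicate])]
        rw [show pad (d - 1) = List.replicate (-(d - 1)).toNat '>' from if_neg (by omega)]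
        rw [show (-(d - 1)).toNat = (-d).toNat + 1 by omega]
    · simp only [blStep, upd, h1, h2, reduceIte]
      rw [if_neg]
      unfold pad
      split_ifs with hd <;> rintro ⟨ha, hb⟩ <;> simp [List.mem_replicate] at ha hb

theorem splitCore_eq_splitTopCore (cs : List Char) (l : List String) (cur : List Char) (d : Int) :
    splitCoreA cs l cur (pad d) = splitTopCore cs l cur d := by
  induction cs generalizing l cur d with
  | nil => simp only [splitCoreA, splitTopCore]; by_cases h : cur = [] <;> simp [h]
  | cons c rest ih =>
    simp only [splitCoreA, splitTopCore, pad_step d c]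
    simp only [List.length_eq_zero_iff, pad_eq_nil_iff]
    split_ifs with hcond
    · exact ih _ _ _
    · exact ih _ _ _

theorem split_eq (s : String) :
    splitStringByNonNestedCommas s = splitTopCore s.toList [] [] 0 := by
  have h : ([] : List Char) = pad 0 := rfl
  unfold splitStringByNonNestedCommas
  rw [h, splitCore_eq_splitTopCore]

-- slices of String.ofList as drop/take
theorem strSlice_eq (l : List Char) (a b : Nat) :
    PySem.Str.slice (String.ofList l) (some (a : Int)) (some (b : Int)) =
      String.ofList ((l.drop a).take (b - a)) := by
  simp [PySem.Str.slice, PySem.List.slice_natCast]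

-- drop/take decompositions used throughout
theorem dropTake_snoc (cs : List Char) (p m : Nat) (h1 : p ≤ m) (h2 : m < cs.length) :
    (cs.drop p).take (m + 1 - p) = (cs.drop p).take (m - p) ++ [cs[m]] := by
  rw [show m + 1 - p = (m - p) + 1 by omega, List.take_add_one]
  congr 1
  rw [List.getElem?_drop, show p + (m - p) = m by omega]
  simp [h2]

-- ========== grammar helpers for Pre_ ==========

-- consume a '<…>' group already open at depth d, return what follows
def findClose (l : List Char) (d : Int) : Option (List Char) :=
  match l with
  | [] => none
  | c :: t => if upd d c = 0 then some t else findClose t (upd d c)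

theorem findClose_length (l : List Char) (d : Int) :
    ∀ t, findClose l d = some t → t.length < l.length := by
  fun_induction findClose l d with
  | case1 => intro t h; simp at h
  | case2 c r d hz => intro t h; simp at h; simp [← h]
  | case3 c r d hz ih => intro t h; have := ih t h; simp only [List.length_cons]; omega

-- chunk-wise (one delimiter group at a time) restatement of the grammar, used by the proofs
def wfCheck (l : List Char) : Bool :=
  match l with
  | [] => true
  | c :: rest =>
    if c = '[' then
      match hd : rest.dropWhile (· ≠ ']') with
      | [] => false                    -- no closing ']'
      | _ :: tail1 =>
        match tail1 with
        | [] => false                  -- nothing after ']': the scan runs off the end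
        | _x :: tail2 =>
          match hf : findClose tail2 1 with
          | none => false              -- angle brackets never close
          | some rest' => wfCheck rest'
    else wfCheck rest
  termination_by l.length
  decreasing_by
  · have h1 : (rest.dropWhile (· ≠ ']')).length ≤ rest.length := rest.length_dropWhile_le _
    have h2 := findClose_length tail2 1 rest' hf
    have h3 : (rest.dropWhile (· ≠ ']')).length = tail2.length + 2 := by rw [hd]; simp
    simp; omega
  · simp

theorem wfA_name (l : List Char) :
    wfA l WfMode.name = (match l.dropWhile (· ≠ ']') with
      | [] => false
      | _ :: t => wfA t WfMode.skip) := by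
  induction l with
  | nil => rfl
  | cons c rest ih =>
    by_cases hc : c = ']'
    · subst hc
      rw [wfA, if_pos rfl, List.dropWhile_cons, if_neg (by simp)]
    · rw [wfA, if_neg hc, List.dropWhile_cons, if_pos (by simp [hc])]
      exact ih

theorem wfA_body (l : List Char) : ∀ d : Nat, 1 ≤ d →
    wfA l (WfMode.body d) = (match findClose l (d : Int) with
      | none => false
      | some rest' => wfA rest' WfMode.norm) := by
  induction l with
  | nil => intro d hd; rfl
  | cons c rest ih =>
    intro d hd
    rw [wfA, findClose]
    by_cases h1 : c = '<'
    · subst h1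
      rw [if_pos rfl]
      rw [show upd (d : Int) '<' = ((d + 1 : Nat) : Int) by simp only [upd, reduceIte]; push_cast; ring]
      rw [if_neg (show ((d + 1 : Nat) : Int) ≠ 0 by push_cast; omega)]
      exact ih (d + 1) (by omega)
    · by_cases h2 : c = '>'
      · subst h2
        have hmode : (if ('>' : Char) = '<' then WfMode.body (d + 1)
              else if ('>' : Char) = '>' then (if d = 1 then WfMode.norm else WfMode.body (d - 1))
              else WfMode.body d)
            = (if d = 1 then WfMode.norm else WfMode.body (d - 1)) := by
          rw [if_neg h1, if_pos rfl]
        rw [hmode]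
        by_cases hd1 : d = 1
        · subst hd1
          rw [show (if 1 = 1 then WfMode.norm else WfMode.body (1 - 1)) = WfMode.norm from rfl]
          rw [if_pos (show upd ((1 : Nat) : Int) '>' = 0 by decide)]
        · rw [if_neg hd1]
          rw [show upd (d : Int) '>' = ((d - 1 : Nat) : Int) by simp only [upd, reduceIte]; push_cast; omega]
          rw [if_neg (show ((d - 1 : Nat) : Int) ≠ 0 by push_cast; omega)]
          exact ih (d - 1) (by omega)
      · rw [if_neg h1, if_neg h2]
        rw [show upd (d : Int) c = (d : Int) by simp [upd, h1, h2]]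
        rw [if_neg (show (d : Int) ≠ 0 by omega)]
        exact ih d hd

theorem wfA_eq (l : List Char) : wfA l WfMode.norm = wfCheck l := by
  fun_induction wfCheck l with
  | case1 => rfl
  | case2 rest hdw =>
    rw [wfA, if_pos rfl, wfA_name, hdw]
  | case3 rest head hdw hdw2 =>
    rw [wfA, if_pos rfl, wfA_name, hdw]
    rfl
  | case4 rest head x tail2 hdw hf hdw2 =>
    rw [wfA, if_pos rfl, wfA_name, hdw]
    show wfA tail2 (WfMode.body 1) = false
    rw [wfA_body tail2 1 le_rfl, Nat.cast_one, hf]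
  | case5 rest head x tail2 hdw rest' hf hdw2 ih =>
    rw [wfA, if_pos rfl, wfA_name, hdw]
    show wfA tail2 (WfMode.body 1) = wfCheck rest'
    rw [wfA_body tail2 1 le_rfl, Nat.cast_one, hf]
    exact ih
  | case6 c rest h ih =>
    rw [wfA, if_neg h]
    exact ih

-- ========== relating A's scans to B's searches ==========

-- reference closing scan by index: first position e ≥ k at which the running depth,
-- starting at d before reading cs[k], returns to 0
def refC (cs : List Char) (k : Nat) (d : Int) : Option Nat :=
  if h : k < cs.length then
    if upd d cs[k] = 0 then some k else refC cs (k + 1) (upd d cs[k])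
  else none
  termination_by cs.length - k

theorem refC_bounds (cs : List Char) (k : Nat) (d : Int) :
    ∀ e, refC cs k d = some e → k ≤ e ∧ e < cs.length := by
  fun_induction refC cs k d with
  | case1 k d hk hz => intro e h; simp at h; omega
  | case2 k d hk hz ih => intro e h; have := ih e h; omega
  | case3 => intro e h; simp at h

theorem findClose_drop (cs : List Char) (k : Nat) (d : Int) :
    findClose (cs.drop k) d = Option.map (fun e => cs.drop (e + 1)) (refC cs k d) := by
  fun_induction refC cs k d with
  | case1 k d hk hz =>
    rw [List.drop_eq_getElem_cons hk, findClose]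
    simp [hz]
  | case2 k d hk hz ih =>
    rw [List.drop_eq_getElem_cons hk, findClose]
    simp only [if_neg hz]
    exact ih
  | case3 k d hk =>
    rw [List.drop_eq_nil_of_le (by omega)]
    simp [findClose]

theorem scanAux_eq_refC (cs : List Char) (e : Nat) (bl : List Char) :
    ∀ d : Int, 1 ≤ d → bl = pad d → scanAux cs e bl = refC cs (e + 1) d := by
  fun_induction scanAux cs e bl with
  | case1 e =>
    intro d hd hpad
    exfalso
    have : pad d = [] := hpad.symm
    rw [pad_eq_nil_iff] at this; omega
  | case2 e bl hbl hlt ih =>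
    intro d hd hpad
    subst hpad
    rw [refC, dif_pos hlt]
    by_cases hz : upd d cs[e + 1] = 0
    · rw [if_pos hz, pad_step, hz]
      rw [show pad 0 = [] by simp [pad]]
      rw [scanAux]
      simp
    · rw [if_neg hz]
      have hd' : 1 ≤ upd d cs[e + 1] := by unfold upd at *; split_ifs at * <;> omega
      exact ih _ hd' (pad_step d _)
  | case3 e bl hbl hge =>
    intro d hd hpad
    rw [refC, dif_neg hge]

-- refC is B's prefix-array search
theorem refC_eq_findKAux (cs : List Char) (lo : Nat) (hlo : lo ≤ cs.length) :
    ∀ t d, d = 1 - (psum cs t - psum cs lo) →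
      refC cs t d = findKAux cs (buildPref cs 0) lo t := by
  intro t
  fun_induction findKAux cs (buildPref cs 0) lo t with
  | case1 t ht heq =>
    intro d hd
    rw [buildPref_getD cs 0 (t + 1) (by omega), buildPref_getD cs 0 lo hlo] at heq
    rw [refC, dif_pos ht, if_pos]
    rw [hd, upd_eq_sub_dval, psum_succ cs t ht] at *
    omega
  | case2 t ht hne ih =>
    intro d hd
    rw [buildPref_getD cs 0 (t + 1) (by omega), buildPref_getD cs 0 lo hlo] at hne
    rw [refC, dif_pos ht, if_neg]
    · exact ih _ (by rw [upd_eq_sub_dval, hd, psum_succ cs t ht]; ring)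
    · intro hz
      apply hne
      rw [hd, upd_eq_sub_dval] at hz
      rw [psum_succ cs t ht]
      omega
  | case3 t ht =>
    intro d hd
    rw [refC, dif_neg ht]

-- findRBr (A's ']' scan) is B's find
theorem findRBr_eq_findCh (cs : List Char) (p : Nat) : findRBr cs p = findCh cs ']' p := by
  fun_induction findRBr cs p with
  | case1 p hp heq => rw [findCh]; simp [hp, heq]
  | case2 p hp hne ih => rw [findCh]; simp [hp, hne]; exact ih
  | case3 p hp => rw [findCh, dif_neg hp]

theorem findCh_drop (cs : List Char) (p : Nat) :
    (cs.drop p).dropWhile (· ≠ ']') =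
      (match findCh cs ']' p with | none => [] | some j => cs.drop j) := by
  fun_induction findCh cs ']' p with
  | case1 p hp heq =>
    rw [List.drop_eq_getElem_cons hp, List.dropWhile_cons]
    simp only [heq, ne_eq, not_true_eq_false, decide_false, Bool.false_eq_true, if_false]
    rw [← heq, ← List.drop_eq_getElem_cons hp]
  | case2 p hp hne ih =>
    rw [List.drop_eq_getElem_cons hp, List.dropWhile_cons]
    simp only [hne, decide_true, ne_eq, not_false_iff, if_pos]
    simpa using ih
  | case3 p hp =>
    rw [List.drop_eq_nil_of_le (by omega)]
    simp

theorem findCh_char (cs : List Char) (c : Char) (p : Nat) :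
    ∀ j, findCh cs c p = some j → ∃ (hj : j < cs.length), cs[j] = c := by
  fun_induction findCh cs c p with
  | case1 p hp heq => intro j h; simp at h; exact ⟨h ▸ hp, h ▸ heq⟩
  | case2 p hp hne ih => exact ih
  | case3 => intro j h; simp at h

theorem findCh_before (cs : List Char) (c : Char) (p : Nat) :
    ∀ j, findCh cs c p = some j →
      ∀ t, p ≤ t → t < j → ∀ (h : t < cs.length), cs[t] ≠ c := by
  fun_induction findCh cs c p with
  | case1 p hp heq => intro j h t h1 h2 h3; simp at h; omega
  | case2 p hp hne ih =>
    intro j h t h1 h2 h3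
    rcases Nat.eq_or_lt_of_le h1 with rfl | hlt
    · exact hne
    · exact ih j h t hlt h2 h3
  | case3 => intro j h; simp at h

theorem findCh_none (cs : List Char) (c : Char) (p : Nat) :
    findCh cs c p = none → ∀ t, p ≤ t → ∀ (h : t < cs.length), cs[t] ≠ c := by
  fun_induction findCh cs c p with
  | case1 p hp heq => intro h; simp at h
  | case2 p hp hne ih =>
    intro h t h1 h2
    rcases Nat.eq_or_lt_of_le h1 with rfl | hlt
    · exact hne
    · exact ih h t hlt h2
  | case3 p hp =>
    intro _ t h1 h2
    omega

-- from Pre_ at a '[', extract the shape both programs follow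
theorem wf_bracket (cs : List Char) (i : Nat) (hi : i < cs.length) (hc : cs[i] = '[')
    (hwf : wfCheck (cs.drop i) = true) :
    ∃ j e, findCh cs ']' (i + 1) = some j ∧ refC cs (j + 2) 1 = some e ∧
      wfCheck (cs.drop (e + 1)) = true ∧ i < j ∧ j + 2 ≤ e ∧ e < cs.length := by
  rw [List.drop_eq_getElem_cons hi, hc, wfCheck.eq_def] at hwf
  simp only [reduceIte] at hwf
  have hdw := findCh_drop cs (i + 1)
  split at hwf
  · simp at hwf
  · rename_i head tail1 heq
    cases hrb : findCh cs ']' (i + 1) with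
    | none => rw [hrb] at hdw; rw [hdw] at heq; cases heq
    | some j =>
      replace hdw : List.dropWhile (fun x => decide (x ≠ ']')) (List.drop (i + 1) cs) =
          List.drop j cs := by rw [hdw, hrb]
      obtain ⟨hjl, hjc⟩ := findCh_char cs ']' (i + 1) j hrb
      have hdj : cs.drop j = head :: tail1 := by rw [← hdw, heq]
      rw [List.drop_eq_getElem_cons hjl, hjc, List.cons.injEq] at hdj
      obtain ⟨hhead, htail1⟩ := hdj
      split at hwf
      · simp at hwf
      · rename_i x tail2 hd2
        split at hwf
        · simp at hwf
        · rename_i rest' heq3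
          have hlen : j + 1 < cs.length := by
            by_contra hge
            rw [List.drop_eq_nil_of_le (by omega)] at htail1; cases htail1
          have htail2 : tail2 = cs.drop (j + 2) := by
            rw [List.drop_eq_getElem_cons hlen, List.cons.injEq] at htail1
            rw [← htail1.2, show j + 1 + 1 = j + 2 by omega]
          rw [htail2, findClose_drop] at heq3
          cases hfc : refC cs (j + 2) 1 with
          | none => rw [hfc] at heq3; cases heq3
          | some e =>
            rw [hfc] at heq3
            simp only [Option.map_some, Option.some.injEq] at heq3
            have hb := refC_bounds cs (j + 2) 1 e hfc
            have hij := findCh_bounds cs ']' (i + 1) j hrb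
            refine ⟨j, e, rfl, hfc, ?_, by omega, by omega, by omega⟩
            rw [heq3]; exact hwf

-- wfCheck ignores the ordinary characters before the next '['
theorem wfCheck_skip (cs : List Char) (i nb : Nat) (hnb : nb ≤ cs.length) :
    i ≤ nb → (∀ t, i ≤ t → t < nb → ∀ (h : t < cs.length), cs[t] ≠ '[') →
    wfCheck (cs.drop i) = wfCheck (cs.drop nb) := by
  intro hle hno
  induction hm : nb - i generalizing i with
  | zero => rw [show i = nb by omega]
  | succ m ih =>
    have hi : i < cs.length := by omega
    rw [List.drop_eq_getElem_cons hi, wfCheck.eq_def]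
    simp only [if_neg (hno i le_rfl (by omega) hi)]
    exact ih (i + 1) (by omega) (fun t h1 h2 h3 => hno t (by omega) h2 h3) (by omega)

-- a loop iteration of A below indexToSkipTo is a `continue`
theorem loopA_skip (cs : List Char) (p q : Nat) (mm : List (List String)) (cur : List Char)
    (hpq : p ≤ q) : loopA cs p mm cur (q : Int) = loopA cs q mm cur (q : Int) := by
  induction hn : q - p generalizing p with
  | zero =>
    have : p = q := by omega
    rw [this]
  | succ n ih =>
    have hlt : p < q := by omega
    by_cases hp : p < cs.length
    · rw [loopA, dif_pos hp, if_pos (by exact_mod_cast hlt)]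
      exact ih (p + 1) (by omega) (by omega)
    · rw [loopA, dif_neg hp, loopA, dif_neg (by omega)]

-- A's loop over a stretch of ordinary characters emits one OTHER token per char
theorem loopA_run (cs : List Char) (i nb : Nat) (mm : List (List String)) (skip : Int)
    (hle : i ≤ nb) (hnb : nb ≤ cs.length)
    (hno : ∀ t, i ≤ t → t < nb → ∀ (h : t < cs.length), cs[t] ≠ '[') (hskip : skip ≤ (i : Int)) :
    loopA cs i mm [] skip =
      loopA cs nb (mm ++ ((cs.drop i).take (nb - i)).map (fun c => ["OTHER", String.ofList [c]]))
        [] skip := by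
  induction hm : nb - i generalizing i mm with
  | zero =>
    rw [show i = nb by omega]
    simp
  | succ m ih =>
    have hi : i < cs.length := by omega
    rw [loopA, dif_pos hi, if_neg (by push_cast; omega),
      if_neg (hno i le_rfl (by omega) hi)]
    rw [ih (i + 1) _ (by omega) (fun t h1 h2 h3 => hno t (by omega) h2 h3)
      (by push_cast at *; omega) (by omega)]
    have hc : (cs.drop i).take (m + 1) = cs[i] :: (cs.drop (i + 1)).take m := by
      rw [List.drop_eq_getElem_cons hi, List.take_succ_cons]
    rw [hc]
    simp

-- B's parts construction equals the depth-counter splitter on the inputs region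
theorem parts_eq (cs : List Char) (lo k : Nat) (hk : k ≤ cs.length) (hlo : lo ≤ cs.length) :
    ∀ t prev parts, lo ≤ prev → prev ≤ t → t ≤ k →
      (let pp := partsFold cs
          ((List.range' t (k - t)).filter
            (fun u => decide (cs.getD u ' ' = ',' ∧
              (buildPref cs 0).getD u 0 = (buildPref cs 0).getD lo 0))) prev parts
       let ps := pp.1 ++ [PySem.Str.slice (String.ofList cs) (some (pp.2 : Int)) (some (k : Int))]
       if (ps.getLast?.getD "") = "" then ps.dropLast else ps)
      = splitTopCore ((cs.drop t).take (k - t)) parts ((cs.drop prev).take (t - prev))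
          (psum cs lo - psum cs t) := by
  intro t
  induction hm : k - t generalizing t with
  | zero =>
    intro prev parts h1 h2 h3
    have ht : t = k := by omega
    subst ht
    simp only [List.range'_zero, List.filter_nil, partsFold, List.take_zero]
    rw [strSlice_eq, splitTopCore]
    rw [List.getLast?_concat]
    simp only [Option.getD_some]
    rw [List.dropLast_concat]
    by_cases hbuf : (cs.drop prev).take (t - prev) = []
    · rw [if_pos (by simp [hbuf]), if_pos hbuf]
    · rw [if_neg, if_neg hbuf]
      intro hcon
      apply hbuf
      have : (String.ofList ((cs.drop prev).take (t - prev))).toList = ("" : String).toList := by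
        rw [hcon]
      simpa using this
  | succ m ih =>
    intro prev parts h1 h2 h3
    have ht : t < k := by omega
    have htl : t < cs.length := by omega
    have hgd : cs.getD t ' ' = cs[t] := List.getD_eq_getElem cs ' ' htl
    have hp1 : (buildPref cs 0).getD t 0 = psum cs t := by
      rw [buildPref_getD cs 0 t (by omega)]; ring
    have hp2 : (buildPref cs 0).getD lo 0 = psum cs lo := by
      rw [buildPref_getD cs 0 lo hlo]; ring
    have hupd : upd (psum cs lo - psum cs t) cs[t] = psum cs lo - psum cs (t + 1) := by
      rw [upd_eq_sub_dval, psum_succ cs t htl]; ring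
    have hcons : (cs.drop t).take (m + 1) = cs[t] :: (cs.drop (t + 1)).take m := by
      rw [List.drop_eq_getElem_cons htl, List.take_succ_cons]
    rw [hcons, splitTopCore, List.range'_succ, List.filter_cons]
    by_cases hcond : cs[t] = ',' ∧ psum cs t = psum cs lo
    · have hdv : dval cs[t] = 0 := by rw [hcond.1]; decide
      have hPt : decide (cs.getD t ' ' = ',' ∧
          (buildPref cs 0).getD t 0 = (buildPref cs 0).getD lo 0) = true := by
        rw [hgd, hp1, hp2]; exact decide_eq_true ⟨hcond.1, hcond.2⟩
      have hsc : upd (psum cs lo - psum cs t) cs[t] = 0 ∧ cs[t] = ',' :=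
        ⟨by rw [hupd, psum_succ cs t htl, hdv]; omega, hcond.1⟩
      rw [if_pos hsc, if_pos hPt]
      have H := ih (t + 1) (by omega) (t + 1)
        (parts ++ [PySem.Str.slice (String.ofList cs) (some (prev : Int)) (some (t : Int))])
        (by omega) le_rfl (by omega)
      simp only [partsFold] at H ⊢
      rw [H, hupd, strSlice_eq, Nat.sub_self, List.take_zero]
    · have hPf : ¬ decide (cs.getD t ' ' = ',' ∧
          (buildPref cs 0).getD t 0 = (buildPref cs 0).getD lo 0) = true := by
        rw [hgd, hp1, hp2]
        simp only [decide_eq_true_eq]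
        exact hcond
      have hsf : ¬ (upd (psum cs lo - psum cs t) cs[t] = 0 ∧ cs[t] = ',') := by
        rintro ⟨hz, hcm⟩
        apply hcond
        have hdv : dval cs[t] = 0 := by rw [hcm]; decide
        rw [hupd, psum_succ cs t htl, hdv] at hz
        exact ⟨hcm, by omega⟩
      rw [if_neg hsf, if_neg hPf]
      rw [ih (t + 1) (by omega) prev parts h1 (by omega) (by omega)]
      rw [hupd, dropTake_snoc cs prev t h2 htl]

-- partsOf, applied to the whole-string prefix array, is the depth-counter splitter
theorem partsOf_eq (cs : List Char) (lo k : Nat) (hlo : lo ≤ k) (hk : k ≤ cs.length) :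
    partsOf cs (buildPref cs 0) lo k = splitTopCore ((cs.drop lo).take (k - lo)) [] [] 0 := by
  have hps := parts_eq cs lo k hk (by omega) lo lo [] le_rfl le_rfl (by omega)
  rw [show psum cs lo - psum cs lo = 0 by ring, Nat.sub_self, List.take_zero] at hps
  unfold partsOf cutsOf
  exact hps

-- the main correspondence: A's loop equals B's staged loop
theorem mainEq (cs : List Char) (i : Nat) :
    ∀ (mm : List (List String)) (skip : Int), skip ≤ (i : Int) → wfCheck (cs.drop i) = true →
      loopA cs i mm [] skip = Option.map (mm ++ ·) (loopB cs (buildPref cs 0) i) := by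
  fun_induction loopB cs (buildPref cs 0) i with
  | case1 i hnb =>
    intro mm skip hskip hwf
    by_cases hi : i ≤ cs.length
    · rw [loopA_run cs i cs.length mm skip hi le_rfl
        (fun t h1 h2 h3 => findCh_none cs '[' i hnb t h1 h3) hskip]
      rw [loopA, dif_neg (by omega)]
      rw [PySem.List.slice_from_natCast]
      rw [List.take_of_length_le (by simp)]
      rfl
    · rw [loopA, dif_neg (by omega), PySem.List.slice_from_natCast,
        List.drop_eq_nil_of_le (by omega)]
      simp
  | case2 i nb hnb hj =>
    intro mm skip hskip hwf
    obtain ⟨hinb, hnbl⟩ := findCh_bounds cs '[' i nb hnb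
    obtain ⟨_, hnbc⟩ := findCh_char cs '[' i nb hnb
    rw [loopA_run cs i nb mm skip hinb (by omega)
      (fun t h1 h2 h3 => findCh_before cs '[' i nb hnb t h1 h2 h3) hskip]
    rw [loopA, dif_pos hnbl]
    rw [if_neg (show ¬((nb : Int) < skip) by omega)]
    rw [if_pos hnbc]
    rw [if_neg (show ¬(([] : List Char) ≠ []) by simp)]
    rw [findRBr_eq_findCh, findCh, dif_pos hnbl]
    rw [if_neg (show ¬(cs[nb] = ']') by rw [hnbc]; decide)]
    rw [hj]
    rfl
  | case3 i nb hnb j hj hk =>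
    intro mm skip hskip hwf
    obtain ⟨hinb, hnbl⟩ := findCh_bounds cs '[' i nb hnb
    obtain ⟨_, hnbc⟩ := findCh_char cs '[' i nb hnb
    have hwf' : wfCheck (cs.drop nb) = true := by
      rw [← wfCheck_skip cs i nb (by omega) hinb
        (fun t h1 h2 h3 => findCh_before cs '[' i nb hnb t h1 h2 h3)]
      exact hwf
    obtain ⟨j2, e, hrb, hrefC, _, _, _, _⟩ := wf_bracket cs nb hnbl hnbc hwf'
    rw [hj] at hrb
    injection hrb with hjj
    subst hjj
    rw [refC_eq_findKAux cs (j + 2) (by omega) (j + 2) 1 (by ring_nf), hk] at hrefC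
    cases hrefC
  | case4 i nb hnb j hj k hk hnone ih =>
    intro mm skip hskip hwf
    obtain ⟨hinb, hnbl⟩ := findCh_bounds cs '[' i nb hnb
    obtain ⟨_, hnbc⟩ := findCh_char cs '[' i nb hnb
    have hwf' : wfCheck (cs.drop nb) = true := by
      rw [← wfCheck_skip cs i nb (by omega) hinb
        (fun t h1 h2 h3 => findCh_before cs '[' i nb hnb t h1 h2 h3)]
      exact hwf
    obtain ⟨j2, e, hrb, hrefC, hwfe, hnj, hje, hel⟩ := wf_bracket cs nb hnbl hnbc hwf'
    rw [hj] at hrb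
    injection hrb with hjj
    subst hjj
    have hkk : e = k := by
      rw [refC_eq_findKAux cs (j + 2) (by omega) (j + 2) 1 (by ring_nf), hk] at hrefC
      exact (Option.some.inj hrefC).symm
    subst hkk
    rw [loopA_run cs i nb mm skip hinb (by omega)
      (fun t h1 h2 h3 => findCh_before cs '[' i nb hnb t h1 h2 h3) hskip]
    rw [loopA, dif_pos hnbl]
    rw [if_neg (show ¬((nb : Int) < skip) by omega)]
    rw [if_pos hnbc]
    rw [if_neg (show ¬(([] : List Char) ≠ []) by simp)]
    have hfind : findRBr cs nb = some j := by
      rw [findRBr_eq_findCh, findCh, dif_pos hnbl]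
      rw [if_neg (show ¬(cs[nb] = ']') by rw [hnbc]; decide)]
      exact hj
    have hsa : scanAux cs (j + 1) ['<'] = some e := by
      rw [scanAux_eq_refC cs (j + 1) ['<'] 1 (by norm_num) (by decide),
        show j + 1 + 1 = j + 2 by omega]
      exact hrefC
    simp only [hfind, hsa]
    rw [show ((e : Int) + 1) = ((e + 1 : Nat) : Int) by push_cast; ring]
    rw [loopA_skip cs (nb + 1) (e + 1) _ [] (by omega)]
    rw [ih _ _ (le_refl _) hwfe, hnone]
    rfl
  | case5 i nb hnb j hj k hk r hsome ih =>
    intro mm skip hskip hwf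
    obtain ⟨hinb, hnbl⟩ := findCh_bounds cs '[' i nb hnb
    obtain ⟨_, hnbc⟩ := findCh_char cs '[' i nb hnb
    have hwf' : wfCheck (cs.drop nb) = true := by
      rw [← wfCheck_skip cs i nb (by omega) hinb
        (fun t h1 h2 h3 => findCh_before cs '[' i nb hnb t h1 h2 h3)]
      exact hwf
    obtain ⟨j2, e, hrb, hrefC, hwfe, hnj, hje, hel⟩ := wf_bracket cs nb hnbl hnbc hwf'
    rw [hj] at hrb
    injection hrb with hjj
    subst hjj
    have hkk : e = k := by
      rw [refC_eq_findKAux cs (j + 2) (by omega) (j + 2) 1 (by ring_nf), hk] at hrefC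
      exact (Option.some.inj hrefC).symm
    subst hkk
    rw [loopA_run cs i nb mm skip hinb (by omega)
      (fun t h1 h2 h3 => findCh_before cs '[' i nb hnb t h1 h2 h3) hskip]
    rw [loopA, dif_pos hnbl]
    rw [if_neg (show ¬((nb : Int) < skip) by omega)]
    rw [if_pos hnbc]
    rw [if_neg (show ¬(([] : List Char) ≠ []) by simp)]
    have hfind : findRBr cs nb = some j := by
      rw [findRBr_eq_findCh, findCh, dif_pos hnbl]
      rw [if_neg (show ¬(cs[nb] = ']') by rw [hnbc]; decide)]
      exact hj
    have hsa : scanAux cs (j + 1) ['<'] = some e := by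
      rw [scanAux_eq_refC cs (j + 1) ['<'] 1 (by norm_num) (by decide),
        show j + 1 + 1 = j + 2 by omega]
      exact hrefC
    simp only [hfind, hsa]
    rw [show ((e : Int) + 1) = ((e + 1 : Nat) : Int) by push_cast; ring]
    rw [loopA_skip cs (nb + 1) (e + 1) _ [] (by omega)]
    rw [ih _ _ (le_refl _) hwfe, hsome]
    -- both sides are `some …`; align the emitted tokens
    have hsplit : splitStringByNonNestedCommas
        (ssB (String.ofList cs) ((j : Int) + 1 + 1) (e : Int)) =
        partsOf cs (buildPref cs 0) (j + 2) e := by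
      have hin : ssB (String.ofList cs) ((j : Int) + 1 + 1) (e : Int)
          = String.ofList ((cs.drop (j + 2)).take (e - (j + 2))) := by
        unfold ssB
        rw [show ((j : Int) + 1 + 1) = (((j + 2 : Nat) : Nat) : Int) by push_cast; ring]
        exact strSlice_eq cs (j + 2) e
      rw [hin, split_eq, partsOf_eq cs (j + 2) e (by omega) (by omega)]
      rw [show (String.ofList ((cs.drop (j + 2)).take (e - (j + 2)))).toList
          = (cs.drop (j + 2)).take (e - (j + 2)) by simp]
    simp only [Option.map_some, Option.some.injEq]
    rw [hsplit, PySem.List.slice_natCast]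
    simp [ssB]

-- ===== VERDICT (by name: the statement is the Claim_ definition above) =====
theorem miniTokenizeMain_spec : Claim_equal_miniTokenizeMain := by
  intro s _ hpre
  unfold Spec_miniTokenizeMain miniTokenizeMain miniTokenizeMain_alt
  rw [mainEq s.toList 0 [] (-1) (by norm_num) (by rw [List.drop_zero, ← wfA_eq]; exact hpre)]
  cases loopB s.toList (buildPref s.toList 0) 0 <;> rfl
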